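-- pv_equiv track=rewrite | github.com/Maerig/advent_of_code_2017 | day6/main.py | run_until_loop
-- ===== SOURCE A (Python) =====
-- def distribute(blocks, src_idx):
--     remaining = blocks[src_idx]
--     blocks[src_idx] = 0
--     i = (src_idx + 1) % len(blocks)
--     while remaining > 0:
--         blocks[i] += 1
--         remaining -= 1
--         i = (i + 1) % len(blocks)
--
-- def run_until_loop(blocks):
--     visited_states = set()
--     visited_states.add(tuple(blocks))
--
--     while True:
--         max_index = blocks.index(max(blocks))
--         distribute(blocks, max_index)
--         state = tuple(blocks)
--         if state in visited_states:
--             return blocks, len(visited_states)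
--         visited_states.add(state)
-- ===== SOURCE B (Python) =====
-- # B: each redistribution round is computed with divmod instead of moving one block at a
-- # time: every cell gets q = v // n (applied only when q is non-zero), the source is reset
-- # to q, and the r = v % n remainder cells after the source get one extra via two plain
-- # range loops (no per-element modulo).  The spread count is a step counter.  Unlike A,
-- # B does not mutate the caller's list (A does); the return value is identical.
-- def run_until_loop(blocks):
--     n = len(blocks)
--     state = list(blocks)
--     seen = {tuple(state)}
--     steps = 0
--     while True:
--         steps += 1
--         v = max(state)
--         i = state.index(v)
--         q, r = divmod(v, n) if v > 0 else (0, 0)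
--         if q:
--             state = [x + q for x in state]
--         state[i] = q
--         end = i + 1 + r
--         for j in range(i + 1, min(end, n)):
--             state[j] += 1
--         for j in range(0, end - n):
--             state[j] += 1
--         t = tuple(state)
--         if t in seen:
--             return state, steps
--         seen.add(t)
-- ===== Notes on version B (the rewrite author's own statement) =====
-- stated objective: alternative
-- what changed: Each redistribution round is computed with divmod in one pass (every cell gets q = v // n, the source is reset to q, the r = v % n remainder cells after the source get one extra via two plain range loops) instead of handing the pile out one block at a time, and the spread count is kept in a step counter instead of taking the length of the visited set.
import Mathlib
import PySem

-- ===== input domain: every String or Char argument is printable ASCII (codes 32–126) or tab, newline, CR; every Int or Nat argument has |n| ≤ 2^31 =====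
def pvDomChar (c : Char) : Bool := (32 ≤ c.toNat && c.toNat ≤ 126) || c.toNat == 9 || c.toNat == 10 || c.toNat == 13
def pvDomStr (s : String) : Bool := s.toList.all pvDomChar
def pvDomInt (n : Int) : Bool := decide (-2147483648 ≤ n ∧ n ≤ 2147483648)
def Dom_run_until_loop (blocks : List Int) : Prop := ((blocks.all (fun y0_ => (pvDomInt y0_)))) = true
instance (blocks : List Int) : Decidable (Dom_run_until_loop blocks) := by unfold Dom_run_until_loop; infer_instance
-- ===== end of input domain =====

-- B computes each redistribution round with divmod (every cell gets q = v // n, the source is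
-- reset to q, the r = v % n remainder cells after the source get one extra) instead of handing
-- the pile out one block at a time, and counts spreads with a step counter; A mutates the
-- caller's list in place, B does not -- the equivalence proved here is about the return value.

-- fuel for the 'while True' loops of BOTH ports: a pure totality guard, never exhausted
-- on any input either Python program actually finishes on.
def pvFuel : Nat := 2 ^ 200

-- ===== PORT A =====
-- the 'while remaining > 0' loop inside distribute: one block at a time, cyclically
def distributeLoop (blocks : List Int) (i : Nat) (remaining : Int) : List Int :=
  if remaining > 0 then
    distributeLoop (blocks.set i (blocks.getD i 0 + 1)) ((i + 1) % blocks.length)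
      (remaining - 1)
  else blocks
termination_by remaining.toNat
decreasing_by omega

def distribute (blocks : List Int) (src : Nat) : List Int :=
  let remaining := blocks.getD src 0
  let blocks' := blocks.set src 0
  distributeLoop blocks' ((src + 1) % blocks'.length) remaining

-- one iteration of A's while-True body up to the visited test:
-- max_index = blocks.index(max(blocks)); distribute(blocks, max_index)
def aStep (blocks : List Int) : List Int :=
  match PySem.List.max? blocks (fun x => x) with
  | none => blocks            -- max([]) raises ValueError: excluded by Pre_
  | some m =>
    match PySem.List.index? blocks m with
    | none => blocks          -- unreachable: the max is a member
    | some src => distribute blocks src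

def aLoop : Nat → List Int → PySem.Set (List Int) → List Int × Int
  | 0, blocks, visited => (blocks, PySem.Set.len visited)   -- fuel guard, unreachable
  | fuel + 1, blocks, visited =>
    let blocks' := aStep blocks
    if PySem.Set.contains visited blocks' then (blocks', PySem.Set.len visited)
    else aLoop fuel blocks' (PySem.Set.add visited blocks')

def run_until_loop (blocks : List Int) : List Int × Int :=
  aLoop pvFuel blocks (PySem.Set.add PySem.Set.empty blocks)

-- ===== PORT B =====
-- B's "for j in range(a, b): state[j] += 1" loops
def incRange (st : List Int) (a b : Int) : List Int :=
  (PySem.List.pyRange a b 1).foldl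
    (fun acc j => PySem.List.pySetD acc j (PySem.List.pyGetD acc j 0 + 1)) st

-- one iteration of B's loop body: divmod distribution (bulk +q, then the remainder window)
def bStep (state : List Int) : List Int :=
  let n := PySem.List.len state
  match PySem.List.max? state (fun x => x) with
  | none => state             -- max([]) raises ValueError: excluded by Pre_
  | some v =>
    match PySem.List.index? state v with
    | none => state           -- unreachable: the max is a member
    | some i =>
      let q : Int := if v > 0 then PySem.Int.floordiv v n else 0
      let r : Int := if v > 0 then PySem.Int.mod v n else 0
      let st1 := if q ≠ 0 then state.map (fun x => x + q) else state
      let st2 := PySem.List.pySetD st1 (i : Int) q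
      let endPos := (i : Int) + 1 + r
      let st3 := incRange st2 ((i : Int) + 1) (min endPos n)
      incRange st3 0 (endPos - n)

def bLoop : Nat → List Int → PySem.Set (List Int) → Int → List Int × Int
  | 0, state, _, steps => (state, steps + 1)                -- fuel guard, unreachable
  | fuel + 1, state, seen, steps =>
    let steps' := steps + 1
    let state' := bStep state
    if PySem.Set.contains seen state' then (state', steps')
    else bLoop fuel state' (PySem.Set.add seen state') steps'

def run_until_loop_alt (blocks : List Int) : List Int × Int :=
  bLoop pvFuel blocks (PySem.Set.add PySem.Set.empty blocks) 0

-- ===== PRECONDITION & SPEC =====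
-- Pre_ excludes only the empty list, on which Python A raises ValueError (max of empty sequence).
def Pre_run_until_loop (blocks : List Int) : Prop := blocks ≠ []
instance (blocks : List Int) : Decidable (Pre_run_until_loop blocks) := by
  unfold Pre_run_until_loop; infer_instance

def pvWitness_run_until_loop : List Int := [0, 2, 7, 0]

def Spec_run_until_loop (blocks : List Int) (out : List Int × Int) : Prop := out = run_until_loop_alt blocks
instance (blocks : List Int) (out : List Int × Int) : Decidable (Spec_run_until_loop blocks out) := by unfold Spec_run_until_loop; infer_instance

-- ===== CLAIM (what is proved, stated in full; the proofs are below) =====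
def Claim_equal_run_until_loop : Prop := ∀ (blocks : List Int), Dom_run_until_loop blocks → Pre_run_until_loop blocks → Spec_run_until_loop blocks (run_until_loop blocks)

-- ===== LEMMAS AND PROOFS =====

-- how many of the r cyclic hits starting at position i land on position j (n = length)
def cnt (n i r j : Nat) : Nat :=
  match r with
  | 0 => 0
  | r + 1 => (if i = j then 1 else 0) + cnt n ((i + 1) % n) r j

theorem length_distributeLoop (blocks : List Int) (i : Nat) (remaining : Int) :
    (distributeLoop blocks i remaining).length = blocks.length := by
  fun_induction distributeLoop blocks i remaining with
  | case1 bs i r hr ih => rw [ih]; exact List.length_set ..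
  | case2 => rfl

theorem distributeLoop_nonpos (blocks : List Int) (i : Nat) {remaining : Int}
    (h : ¬ remaining > 0) : distributeLoop blocks i remaining = blocks := by
  rw [distributeLoop, if_neg h]

-- characterization of A's one-at-a-time loop via the hit-count cnt
theorem distributeLoop_getD (r : Nat) : ∀ (bs : List Int) (i j : Nat), i < bs.length →
    j < bs.length →
    (distributeLoop bs i (r : Int)).getD j 0 = bs.getD j 0 + cnt bs.length i r j := by
  induction r with
  | zero =>
    intro bs i j hi hj
    rw [distributeLoop_nonpos bs i (by omega)]
    simp [cnt]
  | succ r ih =>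
    intro bs i j hi hj
    have hpos : ((r + 1 : Nat) : Int) > 0 := by push_cast; omega
    rw [distributeLoop, if_pos hpos]
    have hstep : ((r + 1 : Nat) : Int) - 1 = ((r : Nat) : Int) := by push_cast; ring
    rw [hstep]
    have hlen : (bs.set i (bs.getD i 0 + 1)).length = bs.length := List.length_set ..
    rw [ih _ ((i + 1) % bs.length) j
      (by rw [hlen]; exact Nat.mod_lt _ (by omega)) (by rw [hlen]; omega), hlen]
    have hgd : (bs.set i (bs.getD i 0 + 1)).getD j 0
        = bs.getD j 0 + (if i = j then 1 else 0) := by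
      by_cases hij : i = j
      · subst hij
        rw [List.getD_eq_getElem _ _ (by rw [hlen]; exact hj), List.getElem_set,
          if_pos rfl, if_pos rfl, List.getD_eq_getElem _ _ hj]
      · rw [List.getD_eq_getElem _ _ (by rw [hlen]; exact hj), List.getElem_set,
          if_neg hij, if_neg hij, List.getD_eq_getElem _ _ hj, add_zero]
    rw [hgd, cnt]
    push_cast
    ring

-- (a + n - b) % n in closed form, for a b < n
theorem modsub {n a b : Nat} (ha : a < n) (hb : b < n) :
    (a + n - b) % n = if b ≤ a then a - b else a + n - b := by
  by_cases h : b ≤ a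
  · have e : a + n - b = (a - b) + n := by omega
    rw [if_pos h, e, Nat.add_mod_right, Nat.mod_eq_of_lt (by omega)]
  · rw [if_neg h, Nat.mod_eq_of_lt (by omega)]

theorem succ_div (r n : Nat) (hn : 0 < n) :
    (r + 1) / n = if r % n + 1 = n then r / n + 1 else r / n := by
  have hdm := Nat.div_add_mod r n
  by_cases h : r % n + 1 = n
  · have e : r + 1 = n * (r / n + 1) := by rw [Nat.mul_succ]; omega
    rw [if_pos h, e, Nat.mul_div_cancel_left _ hn]
  · have hlt : r % n + 1 < n := by have := Nat.mod_lt r hn; omega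
    have e : r + 1 = n * (r / n) + (r % n + 1) := by omega
    rw [if_neg h, e, Nat.mul_add_div hn, Nat.div_eq_of_lt hlt, Nat.add_zero]

theorem succ_mod (r n : Nat) (hn : 0 < n) :
    (r + 1) % n = if r % n + 1 = n then 0 else r % n + 1 := by
  have hdm := Nat.div_add_mod r n
  by_cases h : r % n + 1 = n
  · have e : r + 1 = n * (r / n + 1) := by rw [Nat.mul_succ]; omega
    rw [if_pos h, e, Nat.mul_mod_right]
  · have hlt : r % n + 1 < n := by have := Nat.mod_lt r hn; omega
    have e : r + 1 = n * (r / n) + (r % n + 1) := by omega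
    rw [if_neg h, e, Nat.mul_add_mod, Nat.mod_eq_of_lt hlt]

-- closed form for the hit count: full rounds plus a wrap-around window
theorem cnt_closed {n : Nat} (hn : 0 < n) (r : Nat) : ∀ (s j : Nat), s < n → j < n →
    cnt n s r j = r / n + (if (j + n - s) % n < r % n then 1 else 0) := by
  induction r with
  | zero => intro s j hs hj; simp [cnt]
  | succ r ih =>
    intro s j hs hj
    have hs' : (s + 1) % n < n := Nat.mod_lt _ hn
    rw [cnt, ih _ j hs' hj, succ_div r n hn, succ_mod r n hn,
      modsub hj hs, modsub hj hs']
    have hρ : r % n < n := Nat.mod_lt _ hn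
    have hsm : (s + 1) % n = if s + 1 = n then 0 else s + 1 := by
      by_cases h : s + 1 = n
      · rw [if_pos h, h, Nat.mod_self]
      · rw [if_neg h, Nat.mod_eq_of_lt (by omega)]
    rw [hsm]
    generalize r / n = q at *
    generalize r % n = ρ at *
    split_ifs <;> omega

theorem length_incRange (st : List Int) (a b : Int) :
    (incRange st a b).length = st.length := by
  rw [incRange]
  generalize PySem.List.pyRange a b 1 = l
  induction l generalizing st with
  | nil => rfl
  | cons x xs ih => rw [List.foldl_cons, ih, PySem.List.length_pySetD]

theorem incRange_cons {a b : Int} (st : List Int) (h : a < b) :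
    incRange st a b
      = incRange (PySem.List.pySetD st a (PySem.List.pyGetD st a 0 + 1)) (a + 1) b := by
  rw [incRange, PySem.List.pyRange_one_cons h, List.foldl_cons]
  rfl

-- the window loop adds 1 to exactly the positions in [a, b)
theorem getD_incRange_aux (m : Nat) : ∀ (a b : Int) (st : List Int) (k : Nat),
    (b - a).toNat = m → 0 ≤ a → b ≤ (st.length : Int) → k < st.length →
    (incRange st a b).getD k 0
      = st.getD k 0 + (if a ≤ (k : Int) ∧ (k : Int) < b then 1 else 0) := by
  induction m with
  | zero =>
    intro a b st k hm h0 hb hk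
    rw [incRange, PySem.List.pyRange_one_eq_nil (by omega), List.foldl_nil,
      if_neg (by omega)]
    omega
  | succ m ih =>
    intro a b st k hm h0 hb hk
    have hab : a < b := by omega
    have halt : a.toNat < st.length := by omega
    set st' := PySem.List.pySetD st a (PySem.List.pyGetD st a 0 + 1) with hst'
    have hlen' : st'.length = st.length := PySem.List.length_pySetD ..
    rw [incRange_cons st hab,
      ih (a + 1) b st' k (by omega) (by omega) (by rw [hlen']; exact hb) (by omega)]
    have hgd : st'.getD k 0 = st.getD k 0 + (if (k : Int) = a then 1 else 0) := by
      rw [hst', PySem.List.pySetD_of_nonneg st _ h0,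
        PySem.List.pyGetD_eq_getElem st 0 h0 (by omega)]
      by_cases hka : k = a.toNat
      · subst hka
        rw [if_pos (by omega), List.getD_eq_getElem _ _ (by simpa using hk),
          List.getElem_set, if_pos rfl, List.getD_eq_getElem _ _ hk]
      · rw [if_neg (by omega), List.getD_eq_getElem _ _ (by simpa using hk),
          List.getElem_set, if_neg (fun hc => hka hc.symm),
          List.getD_eq_getElem _ _ hk, add_zero]
    rw [hgd]
    split_ifs <;> omega

theorem getD_incRange (a b : Int) (st : List Int) (k : Nat) (h0 : 0 ≤ a)
    (hb : b ≤ (st.length : Int)) (hk : k < st.length) :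
    (incRange st a b).getD k 0
      = st.getD k 0 + (if a ≤ (k : Int) ∧ (k : Int) < b then 1 else 0) :=
  getD_incRange_aux (b - a).toNat a b st k rfl h0 hb hk

-- the two per-iteration bodies agree (on every list; the empty list short-circuits in both)
theorem step_eq (bs : List Int) : aStep bs = bStep bs := by
  cases hmax : PySem.List.max? bs (fun x => x) with
  | none => simp only [aStep, bStep, hmax]
  | some m =>
    cases hidx : PySem.List.index? bs m with
    | none => simp only [aStep, bStep, hmax, hidx]
    | some src =>
      obtain ⟨hsrc, hval, -⟩ := PySem.List.getElem_of_index?_eq_some hidx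
      have hn : 0 < bs.length := by omega
      have hrem : bs.getD src 0 = m := by
        rw [List.getD_eq_getElem _ _ hsrc, hval]
      simp only [aStep, bStep, distribute, hmax, hidx, PySem.List.len_eq, hrem,
        List.length_set]
      set s : Nat := (src + 1) % bs.length with hs
      have hslt : s < bs.length := Nat.mod_lt _ hn
      set r0 : Nat := m.toNat with hr0
      -- both the q/r pair and A's remaining count are the Nat divmod of r0
      have hqn : (if m > 0 then PySem.Int.floordiv m (bs.length : Int) else 0)
          = ((r0 / bs.length : Nat) : Int) := by
        by_cases hv : m > 0
        · rw [if_pos hv, show m = ((r0 : Nat) : Int) by omega, PySem.Int.floordiv_natCast]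
        · rw [if_neg hv, show r0 = 0 by omega, Nat.zero_div, Nat.cast_zero]
      have hρn : (if m > 0 then PySem.Int.mod m (bs.length : Int) else 0)
          = ((r0 % bs.length : Nat) : Int) := by
        by_cases hv : m > 0
        · rw [if_pos hv, show m = ((r0 : Nat) : Int) by omega, PySem.Int.mod_natCast]
        · rw [if_neg hv, show r0 = 0 by omega, Nat.zero_mod, Nat.cast_zero]
      have hA : distributeLoop (bs.set src 0) s m
          = distributeLoop (bs.set src 0) s ((r0 : Nat) : Int) := by
        by_cases hv : m > 0
        · rw [show m = ((r0 : Nat) : Int) by omega]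
        · rw [distributeLoop_nonpos _ _ (by omega), distributeLoop_nonpos _ _ (by omega)]
      rw [hqn, hρn, hA]
      set qn : Nat := r0 / bs.length with hqdef
      set ρn : Nat := r0 % bs.length with hρdef
      have hρlt : ρn < bs.length := Nat.mod_lt _ hn
      set st1 := if ((qn : Nat) : Int) ≠ 0 then bs.map (fun x => x + ((qn : Nat) : Int))
                 else bs with hst1def
      have hlen1 : st1.length = bs.length := by
        rw [hst1def]; split <;> simp
      have hlen2 : (PySem.List.pySetD st1 (src : Int) ((qn : Nat) : Int)).length
          = bs.length := by rw [PySem.List.length_pySetD, hlen1]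
      have hlen3 : (incRange (PySem.List.pySetD st1 (src : Int) ((qn : Nat) : Int))
          ((src : Int) + 1) (min ((src : Int) + 1 + ((ρn : Nat) : Int)) (bs.length : Int))).length
          = bs.length := by rw [length_incRange, hlen2]
      apply List.ext_getElem
      · rw [length_distributeLoop, List.length_set, length_incRange, hlen3]
      · intro j hj1 hj2
        have hjlt : j < bs.length := by
          rw [length_distributeLoop, List.length_set] at hj1; exact hj1
        rw [← List.getD_eq_getElem _ 0 hj1, ← List.getD_eq_getElem _ 0 hj2]
        -- A side: hit counts in closed form
        have hcharA := distributeLoop_getD r0 (bs.set src 0) s j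
          (by rw [List.length_set]; exact hslt) (by rw [List.length_set]; exact hjlt)
        rw [List.length_set] at hcharA
        rw [hcharA, cnt_closed hn r0 s j hslt hjlt]
        have hsetA : (bs.set src 0).getD j 0 = if j = src then 0 else bs.getD j 0 := by
          by_cases hjs : j = src
          · subst hjs
            rw [if_pos rfl, List.getD_eq_getElem _ _ (by simpa using hjlt),
              List.getElem_set, if_pos rfl]
          · rw [if_neg hjs, List.getD_eq_getElem _ _ (by simpa using hjlt),
              List.getElem_set, if_neg (fun hc => hjs hc.symm),
              List.getD_eq_getElem _ _ hjlt]
        rw [hsetA]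
        -- B side: unwind the chain
        rw [getD_incRange 0 _ _ j le_rfl
          (by rw [hlen3]; omega) (by rw [hlen3]; exact hjlt)]
        rw [getD_incRange ((src : Int) + 1) _ _ j (by positivity)
          (by rw [hlen2]; omega) (by rw [hlen2]; exact hjlt)]
        have h2 : (PySem.List.pySetD st1 (src : Int) ((qn : Nat) : Int)).getD j 0
            = if j = src then ((qn : Nat) : Int) else st1.getD j 0 := by
          have h := PySem.List.pyGetD_pySetD_natCast st1 src j ((qn : Nat) : Int) 0
            (by rw [hlen1]; exact hsrc)
          rwa [PySem.List.pyGetD_natCast, PySem.List.pyGetD_natCast] at h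
        rw [h2]
        have hst1g : st1.getD j 0 = bs.getD j 0 + ((qn : Nat) : Int) := by
          rw [hst1def]
          by_cases hq : ((qn : Nat) : Int) ≠ 0
          · rw [if_pos hq, List.getD_eq_getElem _ _ (by rw [List.length_map]; exact hjlt),
              List.getElem_map, List.getD_eq_getElem _ _ hjlt]
          · rw [if_neg hq, show ((qn : Nat) : Int) = 0 by omega, add_zero]
        rw [hst1g]
        -- the window arithmetic
        have hd := modsub hjlt hslt
        have hdm : r0 % bs.length = ρn := hρdef.symm
        have hdv : r0 / bs.length = qn := hqdef.symm
        rw [hdm, hdv]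
        by_cases hsn : src + 1 = bs.length
        · have hseq : s = 0 := by rw [hs, hsn, Nat.mod_self]
          rw [hseq] at hd ⊢
          split_ifs at hd ⊢ <;> omega
        · have hseq : s = src + 1 := by rw [hs, Nat.mod_eq_of_lt (by omega)]
          rw [hseq] at hd ⊢
          split_ifs at hd ⊢ <;> omega

-- the two while-True loops agree, given the step-counter invariant
theorem loop_eq (fuel : Nat) : ∀ (bs : List Int) (visited : PySem.Set (List Int)) (steps : Int),
    PySem.Set.len visited = steps + 1 →
    aLoop fuel bs visited = bLoop fuel bs visited steps := by
  induction fuel with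
  | zero =>
    intro bs visited steps h
    rw [aLoop, bLoop, h]
  | succ fuel ih =>
    intro bs visited steps h
    rw [aLoop, bLoop]
    simp only [step_eq bs]
    by_cases hmem : PySem.Set.contains visited (bStep bs) = true
    · rw [if_pos hmem, if_pos hmem, h]
    · rw [if_neg hmem, if_neg hmem]
      apply ih
      have hnot : bStep bs ∉ visited := by
        intro hc
        exact hmem ((PySem.Set.contains_iff visited (bStep bs)).mpr hc)
      have hlen : PySem.Set.len (PySem.Set.add visited (bStep bs))
          = PySem.Set.len visited + 1 := by
        rw [PySem.Set.add_of_not_mem hnot]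
        simp [PySem.Set.len]
      rw [hlen, h]

-- ===== VERDICT (by name: the statement is the Claim_ definition above) =====
theorem run_until_loop_spec : Claim_equal_run_until_loop := by
  intro blocks _ _
  unfold Spec_run_until_loop run_until_loop run_until_loop_alt
  apply loop_eq
  rfl
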